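-- pv_equiv track=rewrite | github.com/malkreide/mcp-audit-skill | tools/build_report.py | render_remediation_plan
-- ===== SOURCE A (Python) =====
-- from typing import Any
--
-- SEVERITY_ORDER = ("critical", "high", "medium", "low")
--
-- def render_remediation_plan(summary: dict[str, Any]) -> str:
--     findings = summary.get("findings", {})
--     details = findings.get("details", [])
--     out = ["## 6. Remediation-Plan\n"]
--     if not details:
--         out.append("_Keine Findings._\n")
--         return "\n".join(out)
--     sev_idx = {s: i for i, s in enumerate(SEVERITY_ORDER)}
--     sorted_details = sorted(
--         details,
--         key=lambda d: (
--             sev_idx.get(d.get("severity", "low"), 99),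
--             d.get("category", ""),
--             d.get("check_id", ""),
--         ),
--     )
--     out.append("### Empfohlene Reihenfolge\n")
--     for i, d in enumerate(sorted_details, start=1):
--         out.append(
--             f"{i}. **{d.get('check_id')}** "
--             f"({d.get('severity')}, {d.get('status')})"
--         )
--     out.append("")
--     return "\n".join(out)
-- ===== SOURCE B (Python) =====
-- SEVERITY_ORDER = ("critical", "high", "medium", "low")
--
-- def render_remediation_plan(summary):
--     details = summary.get("findings", {}).get("details", [])
--     if not details:
--         return "## 6. Remediation-Plan\n\n_Keine Findings._\n"
--
--     def sev(d):
--         return d.get("severity", "low")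
--
--     def key2(d):
--         return (d.get("category", ""), d.get("check_id", ""))
--
--     ordered = []
--     for s in SEVERITY_ORDER:
--         ordered.extend(sorted([d for d in details if sev(d) == s], key=key2))
--     ordered.extend(sorted([d for d in details if sev(d) not in SEVERITY_ORDER], key=key2))
--
--     lines = ["## 6. Remediation-Plan\n", "### Empfohlene Reihenfolge\n"]
--     for i, d in enumerate(ordered, 1):
--         lines.append(f"{i}. **{d.get('check_id')}** ({d.get('severity')}, {d.get('status')})")
--     lines.append("")
--     return "\n".join(lines)
-- ===== Notes on version B (the rewrite author's own statement) =====
-- stated objective: alternative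
-- what changed: Replaces the global sort by a 3-tuple key with a severity-rank dict and '99' sentinel by per-severity bucketing: one stable (category, check_id) sort per known-severity bucket plus a trailing bucket for unknown severities, concatenated in severity order.
import Mathlib
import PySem

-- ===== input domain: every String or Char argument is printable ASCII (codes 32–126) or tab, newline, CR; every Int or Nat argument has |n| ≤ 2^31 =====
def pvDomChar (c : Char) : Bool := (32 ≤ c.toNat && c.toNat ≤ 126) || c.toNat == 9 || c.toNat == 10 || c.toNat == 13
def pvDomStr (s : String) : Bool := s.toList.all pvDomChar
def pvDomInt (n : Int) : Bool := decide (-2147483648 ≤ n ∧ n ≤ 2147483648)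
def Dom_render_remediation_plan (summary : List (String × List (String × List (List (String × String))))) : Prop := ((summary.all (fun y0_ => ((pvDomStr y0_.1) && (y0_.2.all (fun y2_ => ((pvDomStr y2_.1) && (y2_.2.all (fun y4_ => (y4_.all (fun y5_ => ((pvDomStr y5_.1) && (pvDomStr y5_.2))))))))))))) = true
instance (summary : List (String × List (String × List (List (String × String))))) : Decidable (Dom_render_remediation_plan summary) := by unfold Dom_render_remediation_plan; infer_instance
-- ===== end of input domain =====

-- B re-implements the single sort keyed by (severity rank via dict w/ 99 sentinel, category, check_id)
-- as per-severity buckets each stably sorted by (category, check_id), concatenated; same cost, alternative decomposition.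

-- shared helpers: d.get(k, dflt) on a detail dict, and the line formatting / enumerate loop
-- (identical in both Pythons)
def SEVERITY_ORDER : List String := ["critical", "high", "medium", "low"]

def pvGet (d : List (String × String)) (k : String) (dflt : String) : String :=
  PySem.Dict.getD (PySem.Dict.mk d) k dflt

-- f"{i}. **{d.get('check_id')}** ({d.get('severity')}, {d.get('status')})"; a missing key formats as "None"
def pvFmtLine (i : Int) (d : List (String × String)) : String :=
  PySem.Int.toStr i ++ ". **" ++ ((PySem.Dict.get? (PySem.Dict.mk d) "check_id").getD "None")
    ++ "** (" ++ ((PySem.Dict.get? (PySem.Dict.mk d) "severity").getD "None")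
    ++ ", " ++ ((PySem.Dict.get? (PySem.Dict.mk d) "status").getD "None") ++ ")"

-- for i, d in enumerate(ds, start=1): one formatted line each
def pvFmtAll (ds : List (List (String × String))) : List String :=
  (PySem.List.enumerate ds 1).map (fun p => pvFmtLine p.1 p.2)

-- ===== PORT A =====
-- sev_idx = {s: i for i, s in enumerate(SEVERITY_ORDER)}
def pvSevIdx : PySem.Dict String Int :=
  (PySem.List.enumerate SEVERITY_ORDER 0).foldl (fun acc p => acc.insert p.2 p.1) PySem.Dict.empty

def render_remediation_plan (summary : List (String × List (String × List (List (String × String))))) : String :=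
  let findings := PySem.Dict.getD (PySem.Dict.mk summary) "findings" []
  let details := PySem.Dict.getD (PySem.Dict.mk findings) "details" []
  let out : List String := ["## 6. Remediation-Plan\n"]
  if details = [] then
    PySem.Str.join "\n" (out ++ ["_Keine Findings._\n"])
  else
    -- sorted(details, key=lambda d: (sev_idx.get(d.get("severity","low"), 99), d.get("category",""), d.get("check_id","")))
    -- the Python 3-tuple key is the lexicographic order Int ×ₗ String ×ₗ String
    let sorted_details := PySem.List.sorted details (fun d =>
      toLex (PySem.Dict.getD pvSevIdx (pvGet d "severity" "low") 99,
             toLex (pvGet d "category" "", pvGet d "check_id" ""))) false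
    PySem.Str.join "\n" ((out ++ ["### Empfohlene Reihenfolge\n"]) ++ pvFmtAll sorted_details ++ [""])

-- ===== PORT B =====
-- Source B's local helper sev(d)
def pvSev (d : List (String × String)) : String := pvGet d "severity" "low"

def render_remediation_plan_alt (summary : List (String × List (String × List (List (String × String))))) : String :=
  let details := PySem.Dict.getD
    (PySem.Dict.mk (PySem.Dict.getD (PySem.Dict.mk summary) "findings" [])) "details" []
  if details = [] then
    "## 6. Remediation-Plan\n\n_Keine Findings._\n"
  else
    let ordered :=
      (SEVERITY_ORDER.foldl (fun acc s =>
          acc ++ PySem.List.sorted2 (details.filter (fun d => pvSev d == s))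
            (fun d => pvGet d "category" "") (fun d => pvGet d "check_id" "") false) [])
      ++ PySem.List.sorted2 (details.filter (fun d => !(SEVERITY_ORDER.contains (pvSev d))))
            (fun d => pvGet d "category" "") (fun d => pvGet d "check_id" "") false
    PySem.Str.join "\n" (["## 6. Remediation-Plan\n", "### Empfohlene Reihenfolge\n"] ++ pvFmtAll ordered ++ [""])

-- ===== PRECONDITION & SPEC =====
def Spec_render_remediation_plan (summary : List (String × List (String × List (List (String × String))))) (out : String) : Prop := out = render_remediation_plan_alt summary
instance (summary : List (String × List (String × List (List (String × String))))) (out : String) : Decidable (Spec_render_remediation_plan summary out) := by unfold Spec_render_remediation_plan; infer_instance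

-- ===== CLAIM (what is proved, stated in full; the proofs are below) =====
def Claim_equal_render_remediation_plan : Prop := ∀ (summary : List (String × List (String × List (List (String × String))))), Dom_render_remediation_plan summary → Spec_render_remediation_plan summary (render_remediation_plan summary)

-- ===== LEMMAS AND PROOFS =====

-- abbreviations for the proofs
def pvKey3 (d : List (String × String)) : Lex (Int × Lex (String × String)) :=
  toLex (PySem.Dict.getD pvSevIdx (pvGet d "severity" "low") 99,
         toLex (pvGet d "category" "", pvGet d "check_id" ""))

def pvRankOf (v : String) : Int :=
  if v = "low" then 3 else if v = "medium" then 2 else if v = "high" then 1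
  else if v = "critical" then 0 else 99

def pvLt2 (a b : List (String × String)) : Bool :=
  decide (pvGet a "category" "" < pvGet b "category" "") ||
    (!decide (pvGet b "category" "" < pvGet a "category" "") &&
      decide (pvGet a "check_id" "" < pvGet b "check_id" ""))

def pvBucket (s : String) (xs : List (List (String × String))) : List (List (String × String)) :=
  PySem.List.sorted2 (xs.filter (fun d => pvSev d == s))
    (fun d => pvGet d "category" "") (fun d => pvGet d "check_id" "") false

def pvOthers (xs : List (List (String × String))) : List (List (String × String)) :=
  PySem.List.sorted2 (xs.filter (fun d => !(SEVERITY_ORDER.contains (pvSev d))))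
    (fun d => pvGet d "category" "") (fun d => pvGet d "check_id" "") false

lemma pvRank_eq (d : List (String × String)) :
    PySem.Dict.getD pvSevIdx (pvGet d "severity" "low") 99 = pvRankOf (pvSev d) := by
  have h : pvSevIdx = (((PySem.Dict.empty.insert "critical" (0:Int)).insert "high" 1).insert "medium" 2).insert "low" 3 := by
    simp [pvSevIdx, SEVERITY_ORDER, PySem.List.enumerate]
  rw [h, pvSev, pvRankOf]
  simp [PySem.Dict.getD_insert]

lemma sorted_snoc {α κ : Type} [LT κ] [DecidableLT κ] (xs : List α) (x : α) (key : α → κ) :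
    PySem.List.sorted (xs ++ [x]) key false =
      PySem.List.insertBy (fun a b => decide (key a < key b)) x (PySem.List.sorted xs key false) := by
  rw [PySem.List.sorted_eq_foldl_insertBy, PySem.List.sorted_eq_foldl_insertBy, List.foldl_append]
  rfl

lemma sorted2_snoc {α κ₁ κ₂ : Type} [LT κ₁] [DecidableLT κ₁] [LT κ₂] [DecidableLT κ₂]
    (xs : List α) (x : α) (k1 : α → κ₁) (k2 : α → κ₂) :
    PySem.List.sorted2 (xs ++ [x]) k1 k2 false =
      PySem.List.insertBy
        (fun a b => decide (k1 a < k1 b) || (!decide (k1 b < k1 a) && decide (k2 a < k2 b)))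
        x (PySem.List.sorted2 xs k1 k2 false) := by
  show List.foldl _ [] (xs ++ [x]) = _
  rw [List.foldl_append]
  rfl

lemma insertBy_middle {α : Type} (bef bef' : α → α → Bool) (x : α) (L1 L2 L3 : List α)
    (h1 : ∀ a ∈ L1, bef x a = false)
    (h2 : ∀ a ∈ L2, bef x a = bef' x a)
    (h3 : ∀ a ∈ L3, bef x a = true) :
    PySem.List.insertBy bef x (L1 ++ (L2 ++ L3)) = L1 ++ (PySem.List.insertBy bef' x L2 ++ L3) := by
  induction L1 with
  | cons a L1 ih =>
    simp only [List.cons_append, PySem.List.insertBy, h1 a (by simp)]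
    simp [ih (fun a ha => h1 a (by simp [ha]))]
  | nil =>
    simp only [List.nil_append]
    induction L2 with
    | nil =>
      cases L3 with
      | nil => rfl
      | cons c L3 => simp [PySem.List.insertBy, h3 c (by simp)]
    | cons b L2 ih2 =>
      simp only [List.cons_append, PySem.List.insertBy, h2 b (by simp)]
      cases hb : bef' x b with
      | true => simp
      | false => simp [ih2 (fun a ha => h2 a (by simp [ha]))]


lemma rk_bucket {s : String} {xs : List (List (String × String))}
    {a : List (String × String)} (h : a ∈ pvBucket s xs) : pvSev a = s := by
  have hm : a ∈ xs.filter (fun d => pvSev d == s) :=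
    (PySem.List.sorted2_perm _ _ _ _).mem_iff.mp h
  simpa using (List.mem_filter.mp hm).2

lemma rk_others {xs : List (List (String × String))}
    {a : List (String × String)} (h : a ∈ pvOthers xs) : pvRankOf (pvSev a) = 99 := by
  have hm : a ∈ xs.filter (fun d => !(SEVERITY_ORDER.contains (pvSev d))) :=
    (PySem.List.sorted2_perm _ _ _ _).mem_iff.mp h
  have hn := (List.mem_filter.mp hm).2
  simp [SEVERITY_ORDER] at hn
  simp [pvRankOf, hn.1, hn.2.1, hn.2.2.1, hn.2.2.2]

lemma bef3_true {x a : List (String × String)}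
    (h : pvRankOf (pvSev x) < pvRankOf (pvSev a)) :
    decide (pvKey3 x < pvKey3 a) = true := by
  simp only [pvKey3, pvRank_eq, decide_eq_true_iff, Prod.Lex.toLex_lt_toLex]
  exact Or.inl h

lemma bef3_false {x a : List (String × String)}
    (h : pvRankOf (pvSev a) < pvRankOf (pvSev x)) :
    decide (pvKey3 x < pvKey3 a) = false := by
  simp only [pvKey3, pvRank_eq, decide_eq_false_iff_not, Prod.Lex.toLex_lt_toLex]
  rintro (h' | ⟨h', -⟩) <;> omega

lemma bef3_eq {x a : List (String × String)}
    (h : pvRankOf (pvSev x) = pvRankOf (pvSev a)) :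
    decide (pvKey3 x < pvKey3 a) =
      (decide (pvGet x "category" "" < pvGet a "category" "") ||
        (!decide (pvGet a "category" "" < pvGet x "category" "") &&
          decide (pvGet x "check_id" "" < pvGet a "check_id" ""))) := by
  simp only [pvKey3, pvRank_eq, Prod.Lex.toLex_lt_toLex, h, lt_self_iff_false, false_or, true_and]
  rcases lt_trichotomy (pvGet x "category" "") (pvGet a "category" "") with hc | hc | hc
  · rw [decide_eq_true (Or.inl hc), decide_eq_true hc]
    rfl
  · have e1 : decide (pvGet x "category" "" < pvGet a "category" "") = false :=
      decide_eq_false (by rw [hc]; exact lt_irrefl _)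
    have e2 : decide (pvGet a "category" "" < pvGet x "category" "") = false :=
      decide_eq_false (by rw [hc]; exact lt_irrefl _)
    rw [e1, e2]
    rcases Decidable.em (pvGet x "check_id" "" < pvGet a "check_id" "") with hi | hi
    · rw [decide_eq_true (Or.inr ⟨hc, hi⟩), decide_eq_true hi]
      rfl
    · have e3 : ¬ (pvGet x "category" "" < pvGet a "category" "" ∨
          pvGet x "category" "" = pvGet a "category" "" ∧
            pvGet x "check_id" "" < pvGet a "check_id" "") := by
        rintro (h' | ⟨-, h'⟩)
        · rw [hc] at h'; exact lt_irrefl _ h'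
        · exact hi h'
      rw [decide_eq_false e3, decide_eq_false hi]
      rfl
  · have e1 : decide (pvGet x "category" "" < pvGet a "category" "") = false :=
      decide_eq_false (asymm hc)
    have e2 : decide (pvGet a "category" "" < pvGet x "category" "") = true := decide_eq_true hc
    have e3 : ¬ (pvGet x "category" "" < pvGet a "category" "" ∨
        pvGet x "category" "" = pvGet a "category" "" ∧
          pvGet x "check_id" "" < pvGet a "check_id" "") := by
      rintro (h' | ⟨h', -⟩)
      · exact asymm hc h'
      · rw [h'] at hc; exact lt_irrefl _ hc
    rw [e1, e2, decide_eq_false e3]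
    rfl

lemma bucket_snoc (s : String) (xs : List (List (String × String))) (x : List (String × String)) :
    pvBucket s (xs ++ [x]) =
      if pvSev x = s then
        PySem.List.insertBy
          (fun a b => decide (pvGet a "category" "" < pvGet b "category" "") ||
            (!decide (pvGet b "category" "" < pvGet a "category" "") &&
              decide (pvGet a "check_id" "" < pvGet b "check_id" "")))
          x (pvBucket s xs)
      else pvBucket s xs := by
  unfold pvBucket
  rw [List.filter_append]
  by_cases h : pvSev x = s
  · have hb : (pvSev x == s) = true := by simpa using h
    simp only [List.filter_cons, List.filter_nil, hb, if_pos h]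
    exact sorted2_snoc _ _ _ _
  · have hb : (pvSev x == s) = false := by simpa using h
    simp [hb, h]

lemma others_snoc (xs : List (List (String × String))) (x : List (String × String)) :
    pvOthers (xs ++ [x]) =
      if SEVERITY_ORDER.contains (pvSev x) then pvOthers xs
      else
        PySem.List.insertBy
          (fun a b => decide (pvGet a "category" "" < pvGet b "category" "") ||
            (!decide (pvGet b "category" "" < pvGet a "category" "") &&
              decide (pvGet a "check_id" "" < pvGet b "check_id" "")))
          x (pvOthers xs) := by
  unfold pvOthers
  rw [List.filter_append]
  by_cases h : SEVERITY_ORDER.contains (pvSev x)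
  · have hmem : pvSev x ∈ SEVERITY_ORDER := by simpa using h
    simp [hmem]
  · have hmem : ¬ pvSev x ∈ SEVERITY_ORDER := by simpa using h
    simp [hmem, sorted2_snoc]

lemma insert_case (x : List (String × String)) (B1 B2 B3 : List (List (String × String)))
    (hB1 : ∀ a ∈ B1, pvRankOf (pvSev a) < pvRankOf (pvSev x))
    (hB2 : ∀ a ∈ B2, pvRankOf (pvSev a) = pvRankOf (pvSev x))
    (hB3 : ∀ a ∈ B3, pvRankOf (pvSev x) < pvRankOf (pvSev a)) :
    PySem.List.insertBy (fun a b => decide (pvKey3 a < pvKey3 b)) x (B1 ++ (B2 ++ B3)) =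
      B1 ++ (PySem.List.insertBy
        (fun a b => decide (pvGet a "category" "" < pvGet b "category" "") ||
          (!decide (pvGet b "category" "" < pvGet a "category" "") &&
            decide (pvGet a "check_id" "" < pvGet b "check_id" "")))
        x B2 ++ B3) :=
  insertBy_middle _ _ x B1 B2 B3
    (fun a ha => bef3_false (hB1 a ha))
    (fun a ha => bef3_eq (hB2 a ha).symm)
    (fun a ha => bef3_true (hB3 a ha))

lemma sort_split (xs : List (List (String × String))) :
    PySem.List.sorted xs pvKey3 false =
      pvBucket "critical" xs ++ (pvBucket "high" xs ++ (pvBucket "medium" xs ++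
        (pvBucket "low" xs ++ pvOthers xs))) := by
  induction xs using List.reverseRecOn with
  | nil => rfl
  | append_singleton xs x ih =>
    rw [sorted_snoc, ih]
    simp only [bucket_snoc, others_snoc]
    by_cases h1 : pvSev x = "critical"
    · have hx : pvRankOf (pvSev x) = 0 := by simp [pvRankOf, h1]
      simp only [h1, SEVERITY_ORDER]
      norm_num
      have e := insert_case x [] (pvBucket "critical" xs)
        (pvBucket "high" xs ++ (pvBucket "medium" xs ++ (pvBucket "low" xs ++ pvOthers xs)))
        (by simp)
        (by intro a ha; rw [rk_bucket ha, hx]; rfl)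
        (by
          intro a ha
          rw [hx]
          rcases List.mem_append.mp ha with ha | ha
          · rw [rk_bucket ha]; decide
          rcases List.mem_append.mp ha with ha | ha
          · rw [rk_bucket ha]; decide
          rcases List.mem_append.mp ha with ha | ha
          · rw [rk_bucket ha]; decide
          · rw [rk_others ha]; norm_num)
      simpa using e
    by_cases h2 : pvSev x = "high"
    · have hx : pvRankOf (pvSev x) = 1 := by simp [pvRankOf, h2]
      simp only [h2, SEVERITY_ORDER]
      norm_num
      have e := insert_case x (pvBucket "critical" xs) (pvBucket "high" xs)
        (pvBucket "medium" xs ++ (pvBucket "low" xs ++ pvOthers xs))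
        (by intro a ha; rw [rk_bucket ha, hx]; decide)
        (by intro a ha; rw [rk_bucket ha, hx]; rfl)
        (by
          intro a ha
          rw [hx]
          rcases List.mem_append.mp ha with ha | ha
          · rw [rk_bucket ha]; decide
          rcases List.mem_append.mp ha with ha | ha
          · rw [rk_bucket ha]; decide
          · rw [rk_others ha]; norm_num)
      simpa using e
    by_cases h3 : pvSev x = "medium"
    · have hx : pvRankOf (pvSev x) = 2 := by simp [pvRankOf, h3]
      simp only [h3, SEVERITY_ORDER]
      norm_num
      have e := insert_case x (pvBucket "critical" xs ++ pvBucket "high" xs) (pvBucket "medium" xs)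
        (pvBucket "low" xs ++ pvOthers xs)
        (by
          intro a ha
          rw [hx]
          rcases List.mem_append.mp ha with ha | ha <;>
            (rw [rk_bucket ha]; decide))
        (by intro a ha; rw [rk_bucket ha, hx]; rfl)
        (by
          intro a ha
          rw [hx]
          rcases List.mem_append.mp ha with ha | ha
          · rw [rk_bucket ha]; decide
          · rw [rk_others ha]; norm_num)
      simpa [List.append_assoc] using e
    by_cases h4 : pvSev x = "low"
    · have hx : pvRankOf (pvSev x) = 3 := by simp [pvRankOf, h4]
      simp only [h4, SEVERITY_ORDER]
      norm_num
      have e := insert_case x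
        (pvBucket "critical" xs ++ (pvBucket "high" xs ++ pvBucket "medium" xs))
        (pvBucket "low" xs) (pvOthers xs)
        (by
          intro a ha
          rw [hx]
          rcases List.mem_append.mp ha with ha | ha
          · rw [rk_bucket ha]; decide
          rcases List.mem_append.mp ha with ha | ha <;>
            (rw [rk_bucket ha]; decide))
        (by intro a ha; rw [rk_bucket ha, hx]; rfl)
        (by intro a ha; rw [hx, rk_others ha]; norm_num)
      simpa [List.append_assoc] using e
    · have hx : pvRankOf (pvSev x) = 99 := by simp [pvRankOf, h1, h2, h3, h4]
      have hco : SEVERITY_ORDER.contains (pvSev x) = false := by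
        simp [SEVERITY_ORDER, h1, h2, h3, h4]
      simp only [h1, h2, h3, h4, hco, if_false, Bool.false_eq_true]
      have e := insert_case x
        (pvBucket "critical" xs ++ (pvBucket "high" xs ++ (pvBucket "medium" xs ++ pvBucket "low" xs)))
        (pvOthers xs) []
        (by
          intro a ha
          rw [hx]
          rcases List.mem_append.mp ha with ha | ha
          · rw [rk_bucket ha]; decide
          rcases List.mem_append.mp ha with ha | ha
          · rw [rk_bucket ha]; decide
          rcases List.mem_append.mp ha with ha | ha <;>
            (rw [rk_bucket ha]; decide))
        (by intro a ha; rw [rk_others ha, hx])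
        (by simp)
      simpa [List.append_assoc] using e

-- ===== VERDICT (by name: the statement is the Claim_ definition above) =====
set_option maxHeartbeats 1600000 in
theorem render_remediation_plan_spec : Claim_equal_render_remediation_plan := by
  intro summary _
  unfold Spec_render_remediation_plan render_remediation_plan render_remediation_plan_alt
  by_cases h : PySem.Dict.getD
      (PySem.Dict.mk (PySem.Dict.getD (PySem.Dict.mk summary) "findings" [])) "details" [] = []
  · rw [if_pos h, if_pos h]
    decide
  · rw [if_neg h, if_neg h]
    rw [show (fun d => toLex (PySem.Dict.getD pvSevIdx (pvGet d "severity" "low") 99,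
        toLex (pvGet d "category" "", pvGet d "check_id" ""))) = pvKey3 from rfl]
    rw [sort_split]
    simp [SEVERITY_ORDER, pvBucket, pvOthers, List.append_assoc]
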